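-- pv_equiv track=rewrite | github.com/AJBats/saturn-daytona-usa-re | tools/add_inline_stubs.py | classify_address
-- ===== SOURCE A (Python) =====
-- def classify_address(addr_int):
--     """Map address to batch file group name."""
--     ranges = [
--         (0x06002000, 0x06004000, "system_low"),
--         (0x06004000, 0x06006000, "game_init"),
--         (0x06005000, 0x06008000, "game_core"),
--         (0x06008000, 0x0600A000, "state_machine"),
--         (0x0600A000, 0x0600C000, "game_logic_a"),
--         (0x0600C000, 0x0600E000, "game_logic_b"),
--         (0x0600E000, 0x06010000, "game_logic_c"),
--         (0x06010000, 0x06012000, "subsystem_10"),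
--         (0x06012000, 0x06014000, "subsystem_12"),
--         (0x06014000, 0x06016000, "subsystem_14"),
--         (0x06016000, 0x06018000, "subsystem_16"),
--         (0x06018000, 0x0601A000, "subsystem_18"),
--         (0x0601A000, 0x0601C000, "subsystem_1a"),
--         (0x0601C000, 0x0601E000, "subsystem_1c"),
--         (0x0601E000, 0x06020000, "subsystem_1e"),
--         (0x06020000, 0x06022000, "rendering_20"),
--         (0x06022000, 0x06026000, "rendering_22"),
--         (0x06026000, 0x06028000, "math_util_26"),
--         (0x06028000, 0x0602A000, "vdp_cmd_28"),
--         (0x0602A000, 0x0602E000, "render_pipe_2a"),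
--         (0x0602E000, 0x06030000, "render_pipe_2e"),
--         (0x06030000, 0x06032000, "scene_30"),
--         (0x06032000, 0x06034000, "scene_32"),
--         (0x06034000, 0x06036000, "cd_system_34"),
--         (0x06036000, 0x06038000, "cd_system_36"),
--         (0x06038000, 0x0603A000, "obj_system_38"),
--         (0x0603A000, 0x0603C000, "obj_system_3a"),
--         (0x0603C000, 0x0603E000, "obj_system_3c"),
--         (0x0603E000, 0x06040000, "obj_system_3e"),
--         (0x06040000, 0x06042000, "session_40"),
--         (0x06042000, 0x06044000, "session_42"),
--     ]
--     for lo, hi, name in ranges: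
--         if lo <= addr_int < hi:
--             return name
--     return "misc"
-- ===== SOURCE B (Python) =====
-- # Flat 4 KiB-block name array: index = addr//4096 - base, one bounds check, one load.
-- # The game_init/game_core overlap is resolved first-match, so the 0x06005000 block
-- # stays "game_init" and game_core only owns the 0x06006000 and 0x06007000 blocks.
-- _BASE = 0x06002000 // 4096  # 24578
--
-- _BLOCK_NAMES = (
--     ["system_low"] * 2
--     + ["game_init"] * 2
--     + ["game_core"] * 2
--     + ["state_machine"] * 2
--     + ["game_logic_a"] * 2
--     + ["game_logic_b"] * 2
--     + ["game_logic_c"] * 2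
--     + ["subsystem_10"] * 2
--     + ["subsystem_12"] * 2
--     + ["subsystem_14"] * 2
--     + ["subsystem_16"] * 2
--     + ["subsystem_18"] * 2
--     + ["subsystem_1a"] * 2
--     + ["subsystem_1c"] * 2
--     + ["subsystem_1e"] * 2
--     + ["rendering_20"] * 2
--     + ["rendering_22"] * 4
--     + ["math_util_26"] * 2
--     + ["vdp_cmd_28"] * 2
--     + ["render_pipe_2a"] * 4
--     + ["render_pipe_2e"] * 2
--     + ["scene_30"] * 2
--     + ["scene_32"] * 2
--     + ["cd_system_34"] * 2
--     + ["cd_system_36"] * 2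
--     + ["obj_system_38"] * 2
--     + ["obj_system_3a"] * 2
--     + ["obj_system_3c"] * 2
--     + ["obj_system_3e"] * 2
--     + ["session_40"] * 2
--     + ["session_42"] * 2
-- )
--
--
-- def classify_address(addr_int):
--     """Map address to batch file group name."""
--     i = addr_int // 4096 - _BASE
--     if 0 <= i < len(_BLOCK_NAMES):
--         return _BLOCK_NAMES[i]
--     return "misc"
-- ===== Notes on version B (the rewrite author's own statement) =====
-- stated objective: alternative
-- what changed: Replaced the per-call linear scan over the range list by a flat per-4KiB-block name array built once (with the game_init/game_core overlap resolved first-match), so each call is one floor-division, one bounds check and one array index.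
import Mathlib
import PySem

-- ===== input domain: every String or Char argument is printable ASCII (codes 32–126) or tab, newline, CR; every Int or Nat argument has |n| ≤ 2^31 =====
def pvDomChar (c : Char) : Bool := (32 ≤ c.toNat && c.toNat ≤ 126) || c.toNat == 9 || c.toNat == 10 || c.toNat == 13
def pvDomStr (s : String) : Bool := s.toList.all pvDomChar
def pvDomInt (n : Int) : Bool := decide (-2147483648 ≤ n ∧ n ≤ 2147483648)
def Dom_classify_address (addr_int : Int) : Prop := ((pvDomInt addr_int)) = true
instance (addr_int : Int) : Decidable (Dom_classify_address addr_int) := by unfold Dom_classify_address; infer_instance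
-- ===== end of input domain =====

set_option maxRecDepth 100000
set_option maxHeartbeats 1000000


-- B replaces A's per-call linear scan over the range list by a flat 4 KiB-block name
-- array indexed by addr // 4096 - base: one bounds check and one load per call.

-- ===== PORT A =====
def pvRangesA : List (Int × Int × String) := [
  (100671488, 100679680, "system_low"),
  (100679680, 100687872, "game_init"),
  (100683776, 100696064, "game_core"),
  (100696064, 100704256, "state_machine"),
  (100704256, 100712448, "game_logic_a"),
  (100712448, 100720640, "game_logic_b"),
  (100720640, 100728832, "game_logic_c"),
  (100728832, 100737024, "subsystem_10"),
  (100737024, 100745216, "subsystem_12"),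
  (100745216, 100753408, "subsystem_14"),
  (100753408, 100761600, "subsystem_16"),
  (100761600, 100769792, "subsystem_18"),
  (100769792, 100777984, "subsystem_1a"),
  (100777984, 100786176, "subsystem_1c"),
  (100786176, 100794368, "subsystem_1e"),
  (100794368, 100802560, "rendering_20"),
  (100802560, 100818944, "rendering_22"),
  (100818944, 100827136, "math_util_26"),
  (100827136, 100835328, "vdp_cmd_28"),
  (100835328, 100851712, "render_pipe_2a"),
  (100851712, 100859904, "render_pipe_2e"),
  (100859904, 100868096, "scene_30"),
  (100868096, 100876288, "scene_32"),
  (100876288, 100884480, "cd_system_34"),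
  (100884480, 100892672, "cd_system_36"),
  (100892672, 100900864, "obj_system_38"),
  (100900864, 100909056, "obj_system_3a"),
  (100909056, 100917248, "obj_system_3c"),
  (100917248, 100925440, "obj_system_3e"),
  (100925440, 100933632, "session_40"),
  (100933632, 100941824, "session_42")]

-- A's loop: first range containing the address wins, else "misc".
def pvScanA : Int → List (Int × Int × String) → String
  | _, [] => "misc"
  | a, (lo, hi, name) :: rest => if lo ≤ a ∧ a < hi then name else pvScanA a rest

def classify_address (addr_int : Int) : String := pvScanA addr_int pvRangesA

-- ===== PORT B =====
-- Source B's module-level flat array: one name per 4 KiB block starting at block 24578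
-- (= 0x06002000 // 4096); the overlap block keeps "game_init" (first match).
def pvBlockNames : List String :=
  List.replicate 2 "system_low"
  ++ List.replicate 2 "game_init"
  ++ List.replicate 2 "game_core"
  ++ List.replicate 2 "state_machine"
  ++ List.replicate 2 "game_logic_a"
  ++ List.replicate 2 "game_logic_b"
  ++ List.replicate 2 "game_logic_c"
  ++ List.replicate 2 "subsystem_10"
  ++ List.replicate 2 "subsystem_12"
  ++ List.replicate 2 "subsystem_14"
  ++ List.replicate 2 "subsystem_16"
  ++ List.replicate 2 "subsystem_18"
  ++ List.replicate 2 "subsystem_1a"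
  ++ List.replicate 2 "subsystem_1c"
  ++ List.replicate 2 "subsystem_1e"
  ++ List.replicate 2 "rendering_20"
  ++ List.replicate 4 "rendering_22"
  ++ List.replicate 2 "math_util_26"
  ++ List.replicate 2 "vdp_cmd_28"
  ++ List.replicate 4 "render_pipe_2a"
  ++ List.replicate 2 "render_pipe_2e"
  ++ List.replicate 2 "scene_30"
  ++ List.replicate 2 "scene_32"
  ++ List.replicate 2 "cd_system_34"
  ++ List.replicate 2 "cd_system_36"
  ++ List.replicate 2 "obj_system_38"
  ++ List.replicate 2 "obj_system_3a"
  ++ List.replicate 2 "obj_system_3c"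
  ++ List.replicate 2 "obj_system_3e"
  ++ List.replicate 2 "session_40"
  ++ List.replicate 2 "session_42"

-- i = addr_int // 4096 - _BASE; bounds-checked index into the array, else "misc".
def classify_address_alt (addr_int : Int) : String :=
  if 0 ≤ PySem.Int.floordiv addr_int 4096 - 24578
      ∧ PySem.Int.floordiv addr_int 4096 - 24578 < (pvBlockNames.length : Int) then
    (PySem.List.pyGet? pvBlockNames (PySem.Int.floordiv addr_int 4096 - 24578)).getD "misc"
  else "misc"

-- ===== PRECONDITION & SPEC =====
def Spec_classify_address (addr_int : Int) (out : String) : Prop := out = classify_address_alt addr_int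
instance (addr_int : Int) (out : String) : Decidable (Spec_classify_address addr_int out) := by unfold Spec_classify_address; infer_instance

-- ===== CLAIM (what is proved, stated in full; the proofs are below) =====
def Claim_equal_classify_address : Prop := ∀ (addr_int : Int), Dom_classify_address addr_int → Spec_classify_address addr_int (classify_address addr_int)

-- ===== LEMMAS AND PROOFS =====

-- The block-index version of A's range list (each bound divided by 4096).
def pvBlockRanges : List (Int × Int × String) := [
  (24578, 24580, "system_low"),
  (24580, 24582, "game_init"),
  (24581, 24584, "game_core"),
  (24584, 24586, "state_machine"),
  (24586, 24588, "game_logic_a"),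
  (24588, 24590, "game_logic_b"),
  (24590, 24592, "game_logic_c"),
  (24592, 24594, "subsystem_10"),
  (24594, 24596, "subsystem_12"),
  (24596, 24598, "subsystem_14"),
  (24598, 24600, "subsystem_16"),
  (24600, 24602, "subsystem_18"),
  (24602, 24604, "subsystem_1a"),
  (24604, 24606, "subsystem_1c"),
  (24606, 24608, "subsystem_1e"),
  (24608, 24610, "rendering_20"),
  (24610, 24614, "rendering_22"),
  (24614, 24616, "math_util_26"),
  (24616, 24618, "vdp_cmd_28"),
  (24618, 24622, "render_pipe_2a"),
  (24622, 24624, "render_pipe_2e"),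
  (24624, 24626, "scene_30"),
  (24626, 24628, "scene_32"),
  (24628, 24630, "cd_system_34"),
  (24630, 24632, "cd_system_36"),
  (24632, 24634, "obj_system_38"),
  (24634, 24636, "obj_system_3a"),
  (24636, 24638, "obj_system_3c"),
  (24638, 24640, "obj_system_3e"),
  (24640, 24642, "session_40"),
  (24642, 24644, "session_42")]

-- A scan over ranges none of which contains k falls through to "misc".
theorem pvScan_misc (k : Int) (rs : List (Int × Int × String))
    (h : ∀ p ∈ rs, ¬(p.1 ≤ k ∧ k < p.2.1)) : pvScanA k rs = "misc" := by
  induction rs with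
  | nil => rfl
  | cons p rest ih =>
    obtain ⟨lo, hi, name⟩ := p
    simp only [pvScanA, if_neg (h (lo, hi, name) List.mem_cons_self)]
    exact ih (fun q hq => h q (List.mem_cons_of_mem _ hq))

theorem pvBlockRanges_eq : pvRangesA.map (fun p => (p.1 / 4096, p.2.1 / 4096, p.2.2)) = pvBlockRanges := by decide

-- A's scan only compares against 4096-aligned bounds, so it is a function of addr // 4096.
theorem pvScanA_div (a : Int) (rs : List (Int × Int × String))
    (h : ∀ p ∈ rs, (4096 : Int) ∣ p.1 ∧ (4096 : Int) ∣ p.2.1) :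
    pvScanA a rs = pvScanA (a / 4096) (rs.map (fun p => (p.1 / 4096, p.2.1 / 4096, p.2.2))) := by
  induction rs with
  | nil => rfl
  | cons p rest ih =>
    obtain ⟨lo, hi, name⟩ := p
    obtain ⟨⟨x, hx⟩, ⟨y, hy⟩⟩ := h (lo, hi, name) (List.mem_cons_self)
    simp only at hx hy
    subst hx hy
    simp only [pvScanA, List.map]
    have hc : (4096 * x ≤ a ∧ a < 4096 * y) ↔
        (4096 * x / 4096 ≤ a / 4096 ∧ a / 4096 < 4096 * y / 4096) := by omega
    rw [if_congr hc rfl (ih (fun q hq => h q (List.mem_cons_of_mem _ hq)))]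

-- For every block index k, scanning the block ranges equals B's bounds-checked array load.
theorem pvMain (k : Int) :
    pvScanA k pvBlockRanges =
      (if 0 ≤ k - 24578 ∧ k - 24578 < (pvBlockNames.length : Int) then
        (PySem.List.pyGet? pvBlockNames (k - 24578)).getD "misc"
      else "misc") := by
  have hlen : (pvBlockNames.length : Int) = 66 := by decide
  rw [hlen]
  by_cases h : 24578 ≤ k ∧ k < 24644
  · obtain ⟨h1, h2⟩ := h
    interval_cases k <;> decide
  · rw [if_neg (by omega)]
    apply pvScan_misc
    have hb : ∀ p ∈ pvBlockRanges, (24578 : Int) ≤ p.1 ∧ p.2.1 ≤ 24644 := by decide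
    intro p hp
    have := hb p hp
    omega

-- ===== VERDICT (by name: the statement is the Claim_ definition above) =====
theorem classify_address_spec : Claim_equal_classify_address := by
  intro a _
  show classify_address a = classify_address_alt a
  rw [classify_address, pvScanA_div a pvRangesA (by decide), pvBlockRanges_eq, pvMain,
    classify_address_alt, PySem.Int.floordiv_eq_ediv_of_pos (by norm_num : (0:Int) < 4096)]
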